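-- pv_equiv track=rewrite | github.com/soyjubilado/AdventOfCode | 2016/07/prog201607.py | SplitBrackets
-- ===== SOURCE A (Python) =====
-- def SplitBrackets(lines):
--   """Given input as a list of lines, return a list of tuples; each tuple
--      contains the words outside brackets and the words inside brackets
--      from the line."""
--   parens_lists = []
--   for l in lines:
--     l = l.replace('[', ' ')
--     l = l.replace(']', ' ')
--     splitted = l.split(' ')
--     nonparens = [w for idx, w in enumerate(splitted) if not idx % 2]
--     parens = [w for idx, w in enumerate(splitted) if idx % 2]
--     parens_lists.append((nonparens, parens))
--   return parens_lists
-- ===== SOURCE B (Python) =====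
-- def SplitBrackets(lines):
--   """Given input as a list of lines, return a list of tuples; each tuple
--      contains the words outside brackets and the words inside brackets
--      from the line."""
--   result = []
--   for line in lines:
--     # Cut the line into fields at every ' ', '[' or ']' (keeping empty
--     # fields).  Bracketed text alternates with unbracketed text, so the
--     # even-indexed fields are outside brackets and the odd-indexed inside.
--     fields = ['']
--     for ch in line:
--       if ch in ' []':
--         fields.append('')
--       else:
--         fields[-1] += ch
--     result.append((fields[0::2], fields[1::2]))
--   return result
-- ===== Notes on version B (the rewrite author's own statement) =====
-- stated objective: simpler
-- what changed: Replaces A's two string replaces, a split and two enumerate-parity comprehensions per line by one character scan that cuts the line into fields at every delimiter, then takes the even/odd-indexed fields by slicing.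
import Mathlib
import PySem

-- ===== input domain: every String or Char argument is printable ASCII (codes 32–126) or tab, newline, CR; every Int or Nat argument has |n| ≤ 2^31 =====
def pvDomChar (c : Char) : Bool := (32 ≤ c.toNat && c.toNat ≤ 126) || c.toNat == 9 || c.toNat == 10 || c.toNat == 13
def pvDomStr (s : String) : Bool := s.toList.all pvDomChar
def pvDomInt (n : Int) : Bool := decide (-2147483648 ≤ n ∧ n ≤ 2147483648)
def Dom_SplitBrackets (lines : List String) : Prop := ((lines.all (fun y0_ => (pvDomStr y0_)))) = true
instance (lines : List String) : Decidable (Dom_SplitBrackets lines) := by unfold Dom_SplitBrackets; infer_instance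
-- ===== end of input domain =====

-- B cuts each line into fields with one character scan at every delimiter (' ', '[', ']')
-- and takes the even/odd-indexed fields by slicing; objective: simpler, same values.

-- ===== PORT A =====
-- one line of A's loop body: replace '['/']' by spaces, split on ' ', parity-partition by index
def pvLineA (l : String) : List String × List String :=
  let l1 := PySem.Str.replace l "[" " "
  let l2 := PySem.Str.replace l1 "]" " "
  let splitted := (PySem.Chars.splitOn l2.toList " ".toList).map String.ofList
  let nonparens := ((PySem.List.enumerate splitted).filter
      (fun p => PySem.Int.mod p.1 2 == 0)).map (·.2)
  let parens := ((PySem.List.enumerate splitted).filter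
      (fun p => !(PySem.Int.mod p.1 2 == 0))).map (·.2)
  (nonparens, parens)

def SplitBrackets (lines : List String) : List (List String × List String) :=
  lines.foldl (fun acc l => acc ++ [pvLineA l]) []

-- ===== PORT B =====
-- one character of B's field-building scan: a delimiter opens a new empty field,
-- any other character is appended to the last field (fields is never empty)
def pvFieldStep (fields : List String) (c : Char) : List String :=
  if c = ' ' ∨ c = '[' ∨ c = ']' then fields ++ [""]
  else fields.dropLast ++ [(fields.getLast?.getD "") ++ String.singleton c]

-- one line of B's loop body: build the fields, then slice out fields[0::2] and fields[1::2]
def pvLineB (l : String) : List String × List String :=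
  let fields := l.toList.foldl pvFieldStep [""]
  ((PySem.List.slice? fields (some 0) none 2).getD [],
   (PySem.List.slice? fields (some 1) none 2).getD [])

def SplitBrackets_alt (lines : List String) : List (List String × List String) :=
  lines.foldl (fun acc l => acc ++ [pvLineB l]) []

-- ===== PRECONDITION & SPEC =====
def Spec_SplitBrackets (lines : List String) (out : List (List String × List String)) : Prop := out = SplitBrackets_alt lines
instance (lines : List String) (out : List (List String × List String)) : Decidable (Spec_SplitBrackets lines out) := by unfold Spec_SplitBrackets; infer_instance

-- ===== CLAIM (what is proved, stated in full; the proofs are below) =====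
def Claim_equal_SplitBrackets : Prop := ∀ (lines : List String), Dom_SplitBrackets lines → Spec_SplitBrackets lines (SplitBrackets lines)

-- ===== LEMMAS AND PROOFS =====

-- boundary (delimiter) characters
def pvBoundary (c : Char) : Bool := c = ' ' || c = '[' || c = ']'

-- A's two replaces, fused: boundary characters become spaces
def pvG (c : Char) : Char := if pvBoundary c then ' ' else c

-- prepend a prefix onto the first piece
def pvConsHead (b : List Char) : List (List Char) → List (List Char)
  | [] => [b]
  | h :: r => (b ++ h) :: r

-- split a char list at the characters satisfying p, keeping empty pieces
def pvSplitP (p : Char → Bool) : List Char → List (List Char)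
  | [] => [[]]
  | c :: t => if p c then [] :: pvSplitP p t else pvConsHead [c] (pvSplitP p t)

-- alternate the pieces into (outside, inside), starting per the flag
def pvParity {α : Type} (inside : Bool) : List α → List α × List α
  | [] => ([], [])
  | w :: r =>
    let q := pvParity (!inside) r
    if inside then (q.1, w :: q.2) else (w :: q.1, q.2)

-- elements at even / odd indices
def pvEvens {α : Type} : List α → List α
  | [] => []
  | [a] => [a]
  | a :: _ :: t => a :: pvEvens t

def pvOdds {α : Type} : List α → List α
  | [] => []
  | _ :: t => pvEvens t

theorem pvReplaceGo_single (b n : Char) : ∀ (l : List Char) (fuel : Nat) (acc : List Char),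
    l.length ≤ fuel →
    PySem.Chars.replace.go [b] [n] fuel l acc = acc.reverse ++ l.map (fun c => if c = b then n else c)
  | [], 0, acc, _ => by simp [PySem.Chars.replace.go]
  | [], fuel+1, acc, _ => by simp [PySem.Chars.replace.go]
  | c :: t, fuel+1, acc, h => by
    simp only [PySem.Chars.replace.go]
    by_cases hc : c = b
    · have hp : List.isPrefixOf [b] (c :: t) = true := by simp [List.isPrefixOf, hc]
      simp only [hp, if_true, List.length_cons, List.length_nil, List.drop_succ_cons, List.drop_zero]
      rw [pvReplaceGo_single b n t fuel _ (by simpa using h)]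
      simp [hc]
    · have hp : List.isPrefixOf [b] (c :: t) = false := by
        simp [List.isPrefixOf]; exact fun hh => (hc hh.symm).elim
      simp only [hp, Bool.false_eq_true, if_false]
      rw [pvReplaceGo_single b n t fuel (c :: acc) (by simpa using h)]
      simp [hc]

theorem pvReplace_single (b n : Char) (cs : List Char) :
    PySem.Chars.replace cs [b] [n] = cs.map (fun c => if c = b then n else c) := by
  unfold PySem.Chars.replace
  simp only [List.isEmpty]
  rw [pvReplaceGo_single b n cs cs.length [] le_rfl]
  simp

theorem pvSplitP_ne_nil (p : Char → Bool) (cs : List Char) : pvSplitP p cs ≠ [] := by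
  cases cs with
  | nil => simp [pvSplitP]
  | cons c t =>
    simp only [pvSplitP]
    split
    · simp
    · cases h : pvSplitP p t <;> simp [pvConsHead]

theorem pvConsHead_nil (X : List (List Char)) (h : X ≠ []) : pvConsHead [] X = X := by
  cases X with
  | nil => exact absurd rfl h
  | cons a r => simp [pvConsHead]

theorem pvConsHead_assoc (a b : List Char) (X : List (List Char)) :
    pvConsHead a (pvConsHead b X) = pvConsHead (a ++ b) X := by
  cases X <;> simp [pvConsHead]

theorem pvSplitOnGo_space : ∀ (l : List Char) (fuel : Nat) (cur : List Char) (acc : List (List Char)),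
    l.length ≤ fuel →
    PySem.Chars.splitOn.go [' '] fuel l cur acc
      = acc.reverse ++ pvConsHead cur.reverse (pvSplitP (· == ' ') l)
  | [], 0, cur, acc, _ => by simp [PySem.Chars.splitOn.go, pvSplitP, pvConsHead]
  | [], fuel+1, cur, acc, _ => by simp [PySem.Chars.splitOn.go, pvSplitP, pvConsHead]
  | c :: t, fuel+1, cur, acc, h => by
    simp only [PySem.Chars.splitOn.go]
    by_cases hc : c = ' '
    · have hp : List.isPrefixOf [' '] (c :: t) = true := by simp [List.isPrefixOf, hc]
      simp only [hp, if_true, List.length_cons, List.length_nil, List.drop_succ_cons, List.drop_zero]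
      rw [pvSplitOnGo_space t fuel [] (cur.reverse :: acc) (by simpa using h)]
      simp only [pvSplitP, hc, pvConsHead]
      cases hx : pvSplitP (fun x => x == ' ') t with
      | nil => exact absurd hx (pvSplitP_ne_nil _ t)
      | cons a r => simp
    · have hp : List.isPrefixOf [' '] (c :: t) = false := by
        simp [List.isPrefixOf]; exact fun hh => (hc hh.symm).elim
      simp only [hp, Bool.false_eq_true, if_false]
      rw [pvSplitOnGo_space t fuel (c :: cur) acc (by simpa using h)]
      simp [pvSplitP, hc, pvConsHead_assoc]

theorem pvSplitOn_space (m : List Char) :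
    PySem.Chars.splitOn m [' '] = pvSplitP (· == ' ') m := by
  unfold PySem.Chars.splitOn
  rw [pvSplitOnGo_space m (m.length + 1) [] [] (by omega)]
  simp [pvConsHead_nil _ (pvSplitP_ne_nil _ m)]

theorem pvSplitP_map (cs : List Char) :
    pvSplitP (· == ' ') (cs.map pvG) = pvSplitP pvBoundary cs := by
  induction cs with
  | nil => rfl
  | cons c t ih =>
    simp only [List.map_cons, pvSplitP]
    by_cases hb : pvBoundary c = true
    · simp [pvG, hb, ih]
    · have hG : pvG c = c := by simp [pvG, hb]
      have hcs : (c == ' ') = false := by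
        simp only [beq_eq_false_iff_ne, ne_eq]
        intro hc; rw [hc] at hb; simp [pvBoundary] at hb
      rw [hG]
      simp [hb, hcs, ih]

theorem pvEnum_parity {α : Type} (ws : List α) : ∀ (n : Int), 0 ≤ n →
    (((PySem.List.enumerate ws n).filter (fun p => PySem.Int.mod p.1 2 == 0)).map (·.2)
      = (pvParity (PySem.Int.mod n 2 == 1) ws).1)
    ∧ (((PySem.List.enumerate ws n).filter (fun p => !(PySem.Int.mod p.1 2 == 0))).map (·.2)
      = (pvParity (PySem.Int.mod n 2 == 1) ws).2) := by
  induction ws with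
  | nil => intro n hn; simp [PySem.List.enumerate, pvParity]
  | cons w r ih =>
    intro n hn
    obtain ⟨ih1, ih2⟩ := ih (n + 1) (by omega)
    simp only [PySem.Int.mod_eq_emod_of_pos (show (0:Int) < 2 by norm_num)] at ih1 ih2 ⊢
    rcases (by omega : n % 2 = 0 ∨ n % 2 = 1) with h0 | h1
    · have hn1 : (n + 1) % 2 = 1 := by omega
      rw [hn1] at ih1 ih2
      refine ⟨?_, ?_⟩ <;> simp [PySem.List.enumerate, pvParity, h0, ih1, ih2]
    · have hn1 : (n + 1) % 2 = 0 := by omega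
      rw [hn1] at ih1 ih2
      refine ⟨?_, ?_⟩ <;> simp [PySem.List.enumerate, pvParity, h1, ih1, ih2]

theorem pvFuse :
    ((fun c => if c = ']' then ' ' else c) ∘ (fun c => if c = '[' then ' ' else c)) = pvG := by
  funext c
  by_cases h1 : c = '['
  · simp [h1, pvG, pvBoundary]
  · by_cases h2 : c = ']'
    · simp [h2, pvG, pvBoundary]
    · by_cases h3 : c = ' ' <;> simp [h1, h2, h3, pvG, pvBoundary]

theorem pvEvens_cons {α : Type} (a : α) (t : List α) : pvEvens (a :: t) = a :: pvOdds t := by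
  cases t <;> simp [pvEvens, pvOdds]

-- pvParity false deals the list into (even-indexed, odd-indexed) elements
theorem pvParity_evens_odds {α : Type} : ∀ (ws : List α),
    pvParity false ws = (pvEvens ws, pvOdds ws) ∧ pvParity true ws = (pvOdds ws, pvEvens ws)
  | [] => by simp [pvParity, pvEvens, pvOdds]
  | w :: r => by
    obtain ⟨h1, h2⟩ := pvParity_evens_odds r
    constructor
    · simp [pvParity, h2, pvEvens_cons, pvOdds]
    · simp [pvParity, h1, pvEvens_cons, pvOdds]

-- B's scan builds exactly the pvSplitP fields (as strings)
theorem pvFoldl_fields : ∀ (cs : List Char) (pre : List String) (w : String),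
    cs.foldl pvFieldStep (pre ++ [w])
      = pre ++ (pvConsHead w.toList (pvSplitP pvBoundary cs)).map String.ofList
  | [], pre, w => by simp [pvSplitP, pvConsHead]
  | c :: t, pre, w => by
    by_cases hd : (c = ' ' ∨ c = '[' ∨ c = ']')
    · have hb : pvBoundary c = true := by
        simp only [pvBoundary, Bool.or_eq_true, decide_eq_true_eq]; tauto
      have hstep : pvFieldStep (pre ++ [w]) c = (pre ++ [w]) ++ [""] := by
        simp [pvFieldStep, hd]
      rw [List.foldl_cons, hstep, pvFoldl_fields t (pre ++ [w]) ""]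
      simp only [pvSplitP, hb, if_true]
      rw [show ("" : String).toList = [] from rfl,
          pvConsHead_nil _ (pvSplitP_ne_nil pvBoundary t)]
      cases hx : pvSplitP pvBoundary t with
      | nil => exact absurd hx (pvSplitP_ne_nil _ t)
      | cons a r => simp [pvConsHead]
    · have hb : pvBoundary c = false := by
        simp only [pvBoundary, Bool.or_eq_false_iff, decide_eq_false_iff_not]; tauto
      have hstep : pvFieldStep (pre ++ [w]) c = pre ++ [w ++ String.singleton c] := by
        simp [pvFieldStep, hd]
      rw [List.foldl_cons, hstep, pvFoldl_fields t pre (w ++ String.singleton c)]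
      simp only [pvSplitP, hb, Bool.false_eq_true, if_false]
      rw [pvConsHead_assoc]
      have : (w ++ String.singleton c).toList = w.toList ++ [c] := by simp
      rw [this]

-- evaluating the even-index slice [0::2]
theorem pvFilterMap_evens {α : Type} : ∀ (xs : List α),
    List.filterMap (fun k : Nat => xs[(2 * (k : Int)).toNat]?) (List.range ((xs.length + 1) / 2))
      = pvEvens xs
  | [] => by simp [pvEvens]
  | [a] => by
    simp [List.range, List.range.loop, pvEvens]
  | a :: b :: t => by
    have hlen : (a :: b :: t).length = t.length + 2 := by simp
    have hcount : ((a :: b :: t).length + 1) / 2 = (t.length + 1) / 2 + 1 := by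
      rw [hlen]; omega
    rw [hcount, List.range_succ_eq_map, List.filterMap_cons]
    have h0 : (a :: b :: t)[(2 * ((0 : Nat) : Int)).toNat]? = some a := by simp
    rw [h0, List.filterMap_map]
    have hfun : ((fun k : Nat => (a :: b :: t)[(2 * (k : Int)).toNat]?) ∘ Nat.succ)
        = (fun k : Nat => t[(2 * (k : Int)).toNat]?) := by
      funext k
      have h1 : (2 * ((k.succ : Nat) : Int)).toNat = 2 * k + 2 := by push_cast; omega
      have h2 : (2 * ((k : Nat) : Int)).toNat = 2 * k := by omega
      simp only [Function.comp, h1, h2]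
      simp
    rw [hfun, pvFilterMap_evens t, pvEvens]

theorem pvSlice0 {α : Type} (xs : List α) :
    (PySem.List.slice? xs (some 0) none 2).getD [] = pvEvens xs := by
  unfold PySem.List.slice? PySem.List.sliceIndices
  norm_num
  have hcount : (if 0 < xs.length then (((xs.length : Int) + 2 - 1) / 2).toNat else 0)
      = (xs.length + 1) / 2 := by
    by_cases h : 0 < xs.length <;> simp [h] <;> omega
  rw [hcount]
  exact pvFilterMap_evens xs

theorem pvSlice1 {α : Type} (xs : List α) :
    (PySem.List.slice? xs (some 1) none 2).getD [] = pvOdds xs := by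
  cases xs with
  | nil =>
    simp [PySem.List.slice?, PySem.List.sliceIndices, pvOdds]
  | cons a t =>
    unfold PySem.List.slice? PySem.List.sliceIndices
    norm_num
    have hcount : (if 0 < t.length then (((t.length : Int) + 2 - 1) / 2).toNat else 0)
      = (t.length + 1) / 2 := by
      by_cases h : 0 < t.length <;> simp [h] <;> omega
    rw [hcount]
    have hfun : (fun k : Nat => (a :: t)[(1 + 2 * (k : Int)).toNat]?)
        = (fun k : Nat => t[(2 * (k : Int)).toNat]?) := by
      funext k
      have h1 : (1 + 2 * ((k : Nat) : Int)).toNat = 2 * k + 1 := by omega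
      have h2 : (2 * ((k : Nat) : Int)).toNat = 2 * k := by omega
      simp only [h1, h2]
      simp
    rw [hfun, pvFilterMap_evens t]
    simp [pvOdds]

theorem pvLine_eq (l : String) : pvLineA l = pvLineB l := by
  simp only [pvLineA, pvLineB]
  have htl : (PySem.Str.replace (PySem.Str.replace l "[" " ") "]" " ").toList
      = l.toList.map pvG := by
    simp only [PySem.Str.replace, String.toList_ofList]
    rw [show ("[" : String).toList = ['['] from rfl, show ("]" : String).toList = [']'] from rfl,
        show (" " : String).toList = [' '] from rfl]
    rw [pvReplace_single, pvReplace_single, List.map_map, pvFuse]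
  rw [htl, show (" " : String).toList = [' '] from rfl, pvSplitOn_space, pvSplitP_map]
  have hfields : l.toList.foldl pvFieldStep [""]
      = (pvSplitP pvBoundary l.toList).map String.ofList := by
    have := pvFoldl_fields l.toList [] ""
    simpa [pvConsHead_nil _ (pvSplitP_ne_nil pvBoundary l.toList)] using this
  set ws := (pvSplitP pvBoundary l.toList).map String.ofList with hws
  obtain ⟨h1, h2⟩ := pvEnum_parity ws 0 le_rfl
  have h0 : (PySem.Int.mod 0 2 == 1) = false := by decide
  rw [h0] at h1 h2
  obtain ⟨hp1, _⟩ := pvParity_evens_odds ws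
  rw [h1, h2, hp1]
  rw [hfields, pvSlice0, pvSlice1]

-- ===== VERDICT (by name: the statement is the Claim_ definition above) =====
theorem SplitBrackets_spec : Claim_equal_SplitBrackets := by
  intro lines _
  unfold Spec_SplitBrackets SplitBrackets SplitBrackets_alt
  rw [PySem.List.foldl_append_singleton_eq_map, PySem.List.foldl_append_singleton_eq_map]
  exact List.map_congr_left (fun l _ => pvLine_eq l)
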